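-- pv_equiv track=rewrite | github.com/GolovanPriherel/Parsing_Excel_Python | PDF_Sales/Old_files/PDF_Sales_Old/PDF_Sales_Pfizer.py | columns_to_delete
-- ===== SOURCE A (Python) =====
-- def columns_to_delete(products):
--     t, cols_num = 0, []
--     for cols in products[2]:
--         if 'vs' in cols:
--             t -= 1
--             cols_num.append(t)
--     cols_num.reverse()
--     return cols_num
-- ===== SOURCE B (Python) =====
-- def columns_to_delete(products):
--     def go(row):
--         if not row:
--             return []
--         rest = go(row[1:])
--         if 'vs' in row[0]:
--             return [x - 1 for x in rest] + [-1]
--         return rest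
--     return go(products[2])
-- ===== Notes on version B (the rewrite author's own statement) =====
-- stated objective: alternative
-- what changed: B builds the answer by structural recursion on the column list: the tail's result is shifted by -1 and -1 is appended whenever the head contains 'vs', replacing A's running-counter append loop followed by a reverse (no counter, no reversal).
import Mathlib
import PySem

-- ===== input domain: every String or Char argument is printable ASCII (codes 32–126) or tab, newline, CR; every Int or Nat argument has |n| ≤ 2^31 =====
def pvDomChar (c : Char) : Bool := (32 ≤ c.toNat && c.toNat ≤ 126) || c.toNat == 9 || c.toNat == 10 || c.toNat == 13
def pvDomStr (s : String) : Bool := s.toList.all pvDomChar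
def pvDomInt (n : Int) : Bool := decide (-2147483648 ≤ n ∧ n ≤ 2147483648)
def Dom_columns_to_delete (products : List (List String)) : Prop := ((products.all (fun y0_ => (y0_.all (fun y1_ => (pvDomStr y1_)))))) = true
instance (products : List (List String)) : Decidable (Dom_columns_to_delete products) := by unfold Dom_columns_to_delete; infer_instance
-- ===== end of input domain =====

-- B rebuilds the result by structural recursion on the column list (shift tail result by -1, append -1 on a match), replacing A's counter-append loop plus reverse; alternative decomposition, not faster.
-- ===== PORT A =====
def columns_to_delete (products : List (List String)) : List Int :=
  match PySem.List.pyGet? products 2 with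
  | none => []  -- IndexError in Python; excluded by Pre_
  | some row =>
    let st := row.foldl
      (fun (st : Int × List Int) cols =>
        if PySem.Str.isIn "vs" cols then (st.1 - 1, st.2 ++ [st.1 - 1]) else st)
      (0, [])
    st.2.reverse

-- ===== PORT B =====
def ctdGo : List String → List Int
  | [] => []
  | c :: cs =>
    let rest := ctdGo cs
    if PySem.Str.isIn "vs" c then rest.map (fun x => x - 1) ++ [-1] else rest

def columns_to_delete_alt (products : List (List String)) : List Int :=
  match PySem.List.pyGet? products 2 with
  | none => []  -- IndexError in Python; excluded by Pre_
  | some row => ctdGo row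

-- ===== PRECONDITION & SPEC =====
-- A does products[2]; it raises IndexError when products has fewer than 3 rows.
def Pre_columns_to_delete (products : List (List String)) : Prop := 3 ≤ products.length
instance (products : List (List String)) : Decidable (Pre_columns_to_delete products) := by unfold Pre_columns_to_delete; infer_instance
def pvWitness_columns_to_delete : List (List String) := [[], [], ["a vs b", "x"]]
def Spec_columns_to_delete (products : List (List String)) (out : List Int) : Prop := out = columns_to_delete_alt products
instance (products : List (List String)) (out : List Int) : Decidable (Spec_columns_to_delete products out) := by unfold Spec_columns_to_delete; infer_instance

-- ===== CLAIM (what is proved, stated in full; the proofs are below) =====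
def Claim_equal_columns_to_delete : Prop := ∀ (products : List (List String)), Dom_columns_to_delete products → Pre_columns_to_delete products → Spec_columns_to_delete products (columns_to_delete products)

-- ===== LEMMAS AND PROOFS =====
-- descending list [t-1, t-2, ..., t-k]: the value of A's accumulator
def ctdDesc : Int → Nat → List Int
  | _, 0 => []
  | t, k+1 => (t - 1) :: ctdDesc (t - 1) k

theorem ctd_fold (row : List String) : ∀ (t : Int) (acc : List Int),
    row.foldl
      (fun (st : Int × List Int) cols =>
        if PySem.Str.isIn "vs" cols then (st.1 - 1, st.2 ++ [st.1 - 1]) else st)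
      (t, acc)
    = (t - row.countP (fun cols => PySem.Str.isIn "vs" cols),
       acc ++ ctdDesc t (row.countP (fun cols => PySem.Str.isIn "vs" cols))) := by
  induction row with
  | nil => intro t acc; simp [ctdDesc]
  | cons c cs ih =>
    intro t acc
    by_cases h : PySem.Str.isIn "vs" c
    · simp only [List.foldl_cons, h, if_true, ih, List.countP_cons, ctdDesc]
      refine Prod.ext ?_ ?_
      · simp; ring
      · simp [List.append_assoc]
    · have h' : PySem.Str.isIn "vs" c = false := by simpa using h
      rw [List.foldl_cons, if_neg h, ih]
      simp only [List.countP_cons, h', Bool.false_eq_true, if_false, add_zero]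

theorem ctdDesc_shift (k : Nat) : ∀ (t : Int),
    ctdDesc (t - 1) k = (ctdDesc t k).map (fun x => x - 1) := by
  induction k with
  | zero => intro t; simp [ctdDesc]
  | succ k ih => intro t; simp only [ctdDesc, List.map_cons, ih]

theorem ctdGo_eq (row : List String) :
    ctdGo row = (ctdDesc 0 (row.countP (fun cols => PySem.Str.isIn "vs" cols))).reverse := by
  induction row with
  | nil => simp [ctdGo, ctdDesc]
  | cons c cs ih =>
    by_cases h : PySem.Str.isIn "vs" c
    · simp only [ctdGo, h, if_true, ih, List.countP_cons, if_true]
      show (ctdDesc 0 (cs.countP _)).reverse.map (fun x => x - 1) ++ [-1]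
          = (ctdDesc 0 (cs.countP (fun cols => PySem.Str.isIn "vs" cols) + 1)).reverse
      rw [show (ctdDesc 0 (cs.countP (fun cols => PySem.Str.isIn "vs" cols) + 1))
            = (0 - 1) :: ctdDesc (0 - 1) (cs.countP (fun cols => PySem.Str.isIn "vs" cols)) from rfl]
      rw [List.reverse_cons, ctdDesc_shift, List.map_reverse]
      norm_num
    · have h' : PySem.Str.isIn "vs" c = false := by simpa using h
      simp only [ctdGo, h', Bool.false_eq_true, if_false, ih, List.countP_cons, add_zero]

-- ===== VERDICT (by name: the statement is the Claim_ definition above) =====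
theorem columns_to_delete_spec : Claim_equal_columns_to_delete := by
  intro products _ hpre
  unfold Spec_columns_to_delete columns_to_delete columns_to_delete_alt
  cases hrow : PySem.List.pyGet? products 2 with
  | none => rfl
  | some row =>
    simp only [ctd_fold row 0 [], List.nil_append, ctdGo_eq]
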